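-- pv_equiv track=rewrite | github.com/sa-as31/smapo_ros2 | web_demo/task_runtime.py | count_vertex_conflicts
-- ===== SOURCE A (Python) =====
-- from typing import Any, Deque, Dict, List, Optional, Tuple
--
-- def count_vertex_conflicts(agents: List[Dict[str, Any]]) -> int:
--     occupied: Dict[str, int] = {}
--     for agent in agents:
--         key = to_key(int(agent["x"]), int(agent["y"]))
--         occupied[key] = occupied.get(key, 0) + 1
--     conflicts = 0
--     for count in occupied.values():
--         if count > 1:
--             conflicts += count - 1
--     return conflicts
--
-- def to_key(x: int, y: int) -> str:
--     return f"{x},{y}"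
-- ===== SOURCE B (Python) =====
-- def count_vertex_conflicts(agents):
--     keys = [to_key(int(agent["x"]), int(agent["y"])) for agent in agents]
--     return len(keys) - len(set(keys))
--
-- def to_key(x, y):
--     return f"{x},{y}"
-- ===== Notes on version B (the rewrite author's own statement) =====
-- stated objective: simpler
-- what changed: Replaces the occupancy-counting dict and the conditional summation loop over its values by the arithmetic identity conflicts = number of agents minus number of distinct occupied cells (len(keys) - len(set(keys))).
import Mathlib
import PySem

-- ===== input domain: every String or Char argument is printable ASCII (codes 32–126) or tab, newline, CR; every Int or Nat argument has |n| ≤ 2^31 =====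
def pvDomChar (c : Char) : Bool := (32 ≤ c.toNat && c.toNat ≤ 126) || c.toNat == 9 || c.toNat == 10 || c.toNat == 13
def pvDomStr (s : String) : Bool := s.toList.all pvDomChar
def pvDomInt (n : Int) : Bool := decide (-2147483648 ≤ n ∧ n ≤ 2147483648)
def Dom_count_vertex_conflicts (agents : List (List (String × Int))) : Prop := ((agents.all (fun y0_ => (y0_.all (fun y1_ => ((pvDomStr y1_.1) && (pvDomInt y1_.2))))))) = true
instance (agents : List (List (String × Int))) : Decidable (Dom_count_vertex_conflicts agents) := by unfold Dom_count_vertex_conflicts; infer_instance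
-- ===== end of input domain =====

-- B replaces the occupancy-count dict and conditional summation with the identity
-- conflicts = number of agents - number of distinct occupied cells (simpler).


-- shared helper: Python's to_key(int(agent["x"]), int(agent["y"])); none = KeyError
def pyToKey (x y : Int) : String := PySem.Int.toStr x ++ "," ++ PySem.Int.toStr y

def agentKey? (agent : List (String × Int)) : Option String :=
  match (PySem.Dict.mk agent).get? "x", (PySem.Dict.mk agent).get? "y" with
  | some x, some y => some (pyToKey x y)
  | _, _ => none

-- ===== PORT A =====
-- the first loop: build 'occupied'; none propagates a KeyError (excluded by Pre_)
def cvcLoop : List (List (String × Int)) → PySem.Dict String Int → Option (PySem.Dict String Int)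
  | [], occ => some occ
  | agent :: rest, occ =>
    match agentKey? agent with
    | some key => cvcLoop rest (occ.insert key (occ.getD key 0 + 1))
    | none => none

def count_vertex_conflicts (agents : List (List (String × Int))) : Int :=
  match cvcLoop agents PySem.Dict.empty with
  | some occ =>
      occ.values.foldl (fun conflicts count => if count > 1 then conflicts + (count - 1) else conflicts) 0
  | none => 0  -- unreachable under Pre_ (KeyError in Python)

-- ===== PORT B =====
def count_vertex_conflicts_alt (agents : List (List (String × Int))) : Int :=
  match agents.mapM agentKey? with
  | some keys => (keys.length : Int) - ((PySem.Set.ofList keys).length : Int)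
  | none => 0  -- unreachable under Pre_ (KeyError in Python)

-- ===== PRECONDITION & SPEC =====
-- Pre_ excludes exactly the agents lacking an "x" or "y" entry, on which Python A raises KeyError.
def Pre_count_vertex_conflicts (agents : List (List (String × Int))) : Prop :=
  (agents.all (fun a => (PySem.Dict.mk a).contains "x" && (PySem.Dict.mk a).contains "y")) = true
instance (agents : List (List (String × Int))) : Decidable (Pre_count_vertex_conflicts agents) := by
  unfold Pre_count_vertex_conflicts; infer_instance

def pvWitness_count_vertex_conflicts : (List (List (String × Int))) :=
  [[("x", 1), ("y", 2)], [("x", 1), ("y", 2)], [("x", 3), ("y", 4)]]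

def Spec_count_vertex_conflicts (agents : List (List (String × Int))) (out : Int) : Prop := out = count_vertex_conflicts_alt agents
instance (agents : List (List (String × Int))) (out : Int) : Decidable (Spec_count_vertex_conflicts agents out) := by unfold Spec_count_vertex_conflicts; infer_instance

-- ===== CLAIM (what is proved, stated in full; the proofs are below) =====
def Claim_equal_count_vertex_conflicts : Prop := ∀ (agents : List (List (String × Int))), Dom_count_vertex_conflicts agents → Pre_count_vertex_conflicts agents → Spec_count_vertex_conflicts agents (count_vertex_conflicts agents)

-- ===== LEMMAS AND PROOFS =====

-- the A-loop over agents is the key-counting fold over the extracted keys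
theorem cvcLoop_eq_mapM (agents : List (List (String × Int))) :
    ∀ occ : PySem.Dict String Int,
      cvcLoop agents occ =
        (agents.mapM agentKey?).map
          (fun keys => keys.foldl (fun d k => d.insert k (d.getD k 0 + 1)) occ) := by
  induction agents with
  | nil => intro occ; simp [cvcLoop]
  | cons a rest ih =>
    intro occ
    cases h : agentKey? a with
    | none => simp [cvcLoop, h, List.mapM_cons]
    | some key =>
      simp [cvcLoop, h, List.mapM_cons, ih]
      cases rest.mapM agentKey? <;> simp

-- under Pre_, every key extraction succeeds
theorem mapM_agentKey_isSome (agents : List (List (String × Int)))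
    (h : Pre_count_vertex_conflicts agents) : (agents.mapM agentKey?).isSome := by
  induction agents with
  | nil => simp
  | cons a rest ih =>
    unfold Pre_count_vertex_conflicts at h
    simp only [List.all_cons, Bool.and_eq_true] at h
    obtain ⟨⟨hx, hy⟩, hrest⟩ := h
    have hk : (agentKey? a).isSome := by
      unfold agentKey?
      rw [PySem.Dict.contains_eq_isSome_get?] at hx hy
      cases hgx : ((PySem.Dict.mk a).get? "x") <;> cases hgy : ((PySem.Dict.mk a).get? "y") <;>
        simp_all
    have hr := ih hrest
    cases hko : agentKey? a with
    | none => rw [hko] at hk; simp at hk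
    | some k =>
      cases hro : rest.mapM agentKey? with
      | none => rw [hro] at hr; simp at hr
      | some ks => simp [List.mapM_cons, hko, hro]

-- conflict-summation fold over values all ≥ 1
theorem foldl_conf (l : List Int) : ∀ c : Int, (∀ v ∈ l, 1 ≤ v) →
    l.foldl (fun conflicts count => if count > 1 then conflicts + (count - 1) else conflicts) c
      = c + l.sum - l.length := by
  induction l with
  | nil => intro c _; simp
  | cons v t ih =>
    intro c h
    have hv : 1 ≤ v := h v (by simp)
    have ht : ∀ w ∈ t, 1 ≤ w := fun w hw => h w (by simp [hw])
    simp only [List.foldl_cons, List.sum_cons, List.length_cons]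
    rw [ih _ ht]
    by_cases hv1 : v > 1 <;> simp [hv1] <;> omega

-- counts over the PySem dedup sum to the length (bridge to Mathlib's dedup by permutation)
theorem sum_count_pydedup (keys : List String) :
    ((PySem.List.dedup keys).map (fun k => keys.count k)).sum = keys.length := by
  have hperm : List.Perm (PySem.List.dedup keys) keys.dedup := by
    apply (List.perm_ext_iff_of_nodup (PySem.List.nodup_dedup keys) keys.nodup_dedup).mpr
    intro a
    simp
  calc ((PySem.List.dedup keys).map (fun k => keys.count k)).sum
      = ((keys.dedup).map (fun k => keys.count k)).sum := (hperm.map _).sum_eq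
    _ = keys.length := List.sum_map_count_dedup_eq_length keys

-- the core identity: A's value on the key list equals B's value on it
theorem conflicts_eq_length_sub (keys : List String) :
    (PySem.Dict.counter keys).values.foldl
        (fun conflicts count => if count > 1 then conflicts + (count - 1) else conflicts) 0
      = (keys.length : Int) - ((PySem.Set.ofList keys).length : Int) := by
  have hvals : (PySem.Dict.counter keys).values
      = (PySem.Set.ofList keys).map (fun k => (keys.count k : Int)) := by
    show ((PySem.Dict.counter keys).items).map (·.2) = _
    rw [PySem.Dict.items_counter]
    simp
  rw [hvals, foldl_conf]
  · have hsum : ((PySem.Set.ofList keys).map (fun k => (keys.count k : Int))).sum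
        = (keys.length : Int) := by
      have := sum_count_pydedup keys
      calc ((PySem.Set.ofList keys).map (fun k => (keys.count k : Int))).sum
          = (((PySem.List.dedup keys).map (fun k => keys.count k)).sum : Int) := by
            simp [← PySem.List.dedup_eq_ofList, List.map_map]
            induction PySem.List.dedup keys with
            | nil => simp
            | cons a t ih => simp [ih]
      _ = (keys.length : Int) := by rw [this]
    rw [hsum]
    simp
  · intro v hv
    simp only [List.mem_map] at hv
    obtain ⟨k, hk, rfl⟩ := hv
    have hk' : k ∈ keys := by simpa [PySem.Set.mem_ofList] using hk
    have : 1 ≤ keys.count k := List.count_pos_iff.mpr hk'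
    exact_mod_cast this

-- ===== VERDICT (by name: the statement is the Claim_ definition above) =====
theorem count_vertex_conflicts_spec : Claim_equal_count_vertex_conflicts := by
  intro agents _ hpre
  unfold Spec_count_vertex_conflicts count_vertex_conflicts count_vertex_conflicts_alt
  have hsome := mapM_agentKey_isSome agents hpre
  cases hk : agents.mapM agentKey? with
  | none => rw [hk] at hsome; simp at hsome
  | some keys =>
    rw [cvcLoop_eq_mapM, hk]
    simp only [Option.map_some]
    rw [PySem.Dict.foldl_insert_getD_add_one_eq_counter]
    exact conflicts_eq_length_sub keys
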